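-- pv_equiv track=rewrite | github.com/crate-1556/tjs2-decompiler | tjs2_formatting.py | _count_braces_in_line
-- ===== SOURCE A (Python) =====
-- def _count_braces_in_line(line: str) -> int:
--     delta = 0
--     in_str = False
--     str_char = None
--     i = 0
--     while i < len(line):
--         ch = line[i]
--         if in_str:
--             if ch == '\\':
--                 i += 2
--                 continue
--             if ch == str_char:
--                 in_str = False
--             i += 1
--             continue
--         if ch in ('"', "'"):
--             in_str = True
--             str_char = ch
--         elif ch == '{':
--             delta += 1
--         elif ch == '}':
--             delta -= 1
--         elif ch == '/' and i + 1 < len(line) and line[i + 1] == '/':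
--             break
--         i += 1
--     return delta
-- ===== SOURCE B (Python) =====
-- def _skip_string(line, i, quote):
--     n = len(line)
--     while i < n:
--         if line[i] == '\\':
--             i += 2
--         elif line[i] == quote:
--             return i + 1
--         else:
--             i += 1
--     return i
--
--
-- def _count_braces_in_line(line: str) -> int:
--     cleaned = []
--     i = 0
--     n = len(line)
--     while i < n:
--         ch = line[i]
--         if ch in '"\'':
--             i = _skip_string(line, i + 1, ch)
--         elif ch == '/' and i + 1 < n and line[i + 1] == '/':
--             break
--         else:
--             cleaned.append(ch)
--             i += 1
--     c = ''.join(cleaned)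
--     return c.count('{') - c.count('}')
-- ===== Notes on version B (the rewrite author's own statement) =====
-- stated objective: idiomatic
-- what changed: B replaces A's single flat state machine (an in_str flag threaded through one index loop with a running delta) by a two-phase decomposition: a helper skips each string literal wholesale and the main loop builds a cleaned copy of the line truncated at the line comment, then the result is the count of opening braces minus the count of closing braces in the cleaned text.
import Mathlib
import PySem

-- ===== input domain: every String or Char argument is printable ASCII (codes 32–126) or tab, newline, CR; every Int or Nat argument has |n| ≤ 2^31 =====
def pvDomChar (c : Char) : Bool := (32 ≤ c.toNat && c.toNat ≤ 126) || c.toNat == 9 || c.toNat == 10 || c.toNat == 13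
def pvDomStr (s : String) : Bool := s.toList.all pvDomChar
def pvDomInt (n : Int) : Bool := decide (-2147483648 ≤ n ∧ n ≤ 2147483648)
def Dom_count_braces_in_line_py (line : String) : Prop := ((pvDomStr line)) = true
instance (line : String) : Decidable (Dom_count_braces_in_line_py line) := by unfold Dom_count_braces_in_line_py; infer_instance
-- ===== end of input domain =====

-- B replaces A's flat in-string/out-of-string state machine by a two-phase scheme: strip
-- string literals (via a nested skip helper) and the // comment, then count braces on the
-- cleaned text. Objective: idiomatic decomposition, same cost.

-- ===== PORT A =====
-- A's while loop with state (delta, in_str, str_char); the index i becomes the list suffix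
-- from position i, 'i += 2' drops two characters (or ends the loop past the end, as in Python).
def pvALoop : List Char → Int → Bool → Option Char → Int
  | [], delta, _, _ => delta
  | ch :: rest, delta, inStr, strChar =>
    if inStr then
      if ch = '\\' then
        match rest with
        | [] => delta
        | _ :: rest2 => pvALoop rest2 delta inStr strChar
      else if strChar = some ch then pvALoop rest delta false strChar
      else pvALoop rest delta inStr strChar
    else if ch = '"' ∨ ch = '\'' then pvALoop rest delta true (some ch)
    else if ch = '{' then pvALoop rest (delta + 1) inStr strChar
    else if ch = '}' then pvALoop rest (delta - 1) inStr strChar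
    else if ch = '/' ∧ rest ≠ [] ∧ rest.headD ' ' = '/' then delta
    else pvALoop rest delta inStr strChar

def count_braces_in_line_py (line : String) : Int :=
  pvALoop line.toList 0 false none

-- ===== PORT B =====
-- Source B's _skip_string: advance past a string literal body (backslash skips two);
-- the returned index becomes the remaining suffix.
def pvSkipString : List Char → Char → List Char
  | [], _ => []
  | c :: rest, quote =>
    if c = '\\' then
      match rest with
      | [] => []
      | _ :: rest2 => pvSkipString rest2 quote
    else if c = quote then rest
    else pvSkipString rest quote

-- Source B's main loop: build the cleaned character list (accumulator, reversed at exit).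
-- The fuel counter is only a totality guard: each iteration consumes at least one character,
-- so fuel = length of the whole line never runs out.
def pvCleanLoop : Nat → List Char → List Char → List Char
  | 0, _, acc => acc.reverse
  | _ + 1, [], acc => acc.reverse
  | fuel + 1, ch :: rest, acc =>
    if ch = '"' ∨ ch = '\'' then pvCleanLoop fuel (pvSkipString rest ch) acc
    else if ch = '/' ∧ rest ≠ [] ∧ rest.headD ' ' = '/' then acc.reverse
    else pvCleanLoop fuel rest (ch :: acc)

def count_braces_in_line_py_alt (line : String) : Int :=
  let c := pvCleanLoop line.toList.length line.toList []
  (c.count '{' : Int) - (c.count '}' : Int)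

-- ===== PRECONDITION & SPEC =====
def Spec_count_braces_in_line_py (line : String) (out : Int) : Prop := out = count_braces_in_line_py_alt line
instance (line : String) (out : Int) : Decidable (Spec_count_braces_in_line_py line out) := by unfold Spec_count_braces_in_line_py; infer_instance

-- ===== CLAIM (what is proved, stated in full; the proofs are below) =====
def Claim_equal_count_braces_in_line_py : Prop := ∀ (line : String), Dom_count_braces_in_line_py line → Spec_count_braces_in_line_py line (count_braces_in_line_py line)

-- ===== LEMMAS AND PROOFS =====

-- one-step unfolding lemmas (the equation compiler splits on the nested match, so a
-- general cons equation needs a case split on the tail)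
theorem pvALoop_cons (ch : Char) (rest : List Char) (delta : Int) (inStr : Bool) (strChar : Option Char) :
    pvALoop (ch :: rest) delta inStr strChar =
      (if inStr then
        if ch = '\\' then
          match rest with
          | [] => delta
          | _ :: rest2 => pvALoop rest2 delta inStr strChar
        else if strChar = some ch then pvALoop rest delta false strChar
        else pvALoop rest delta inStr strChar
      else if ch = '"' ∨ ch = '\'' then pvALoop rest delta true (some ch)
      else if ch = '{' then pvALoop rest (delta + 1) inStr strChar
      else if ch = '}' then pvALoop rest (delta - 1) inStr strChar
      else if ch = '/' ∧ rest ≠ [] ∧ rest.headD ' ' = '/' then delta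
      else pvALoop rest delta inStr strChar) := by
  cases rest <;> rfl

theorem pvSkipString_cons (c : Char) (rest : List Char) (quote : Char) :
    pvSkipString (c :: rest) quote =
      (if c = '\\' then
        match rest with
        | [] => []
        | _ :: rest2 => pvSkipString rest2 quote
      else if c = quote then rest
      else pvSkipString rest quote) := by
  cases rest <;> rfl

theorem pvSkipString_length_le (cs : List Char) (q : Char) :
    (pvSkipString cs q).length ≤ cs.length := by
  fun_induction pvSkipString cs q <;> simp_all <;> omega

-- accumulator lemma for pvCleanLoop
theorem pvCleanLoop_acc (fuel : Nat) : ∀ (cs acc : List Char), cs.length ≤ fuel →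
    pvCleanLoop fuel cs acc = acc.reverse ++ pvCleanLoop fuel cs [] := by
  induction fuel with
  | zero => intro cs acc h; simp [pvCleanLoop]
  | succ fuel ih =>
    intro cs acc h
    match cs with
    | [] => simp [pvCleanLoop]
    | ch :: rest =>
      rw [pvCleanLoop]
      conv_rhs => rw [pvCleanLoop]
      by_cases hq : ch = '"' ∨ ch = '\''
      · simp only [hq, if_true]
        have hs := pvSkipString_length_le rest ch
        exact ih _ acc (by simp at h; omega)
      · simp only [hq, if_false]
        by_cases hsl : ch = '/' ∧ rest ≠ [] ∧ rest.headD ' ' = '/'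
        · obtain ⟨hA, hB, hC⟩ := hsl
          have hC' : rest.head?.getD ' ' = '/' := by
            cases rest with
            | nil => exact absurd rfl hB
            | cons x l => simpa using hC
          simp [hA, hB, hC']
        · simp only [hsl, if_false]
          rw [ih rest (ch :: acc) (by simp at h; omega),
              ih rest [ch] (by simp at h; omega)]
          simp

-- A's in-string phase equals skipping the literal with pvSkipString
theorem pvALoop_str_aux (k : Nat) : ∀ (cs : List Char) (q : Char) (delta : Int),
    cs.length ≤ k →
    pvALoop cs delta true (some q) = pvALoop (pvSkipString cs q) delta false (some q) := by
  induction k with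
  | zero =>
    intro cs q delta h
    have : cs = [] := by cases cs with | nil => rfl | cons a l => simp at h
    subst this; rfl
  | succ k ih =>
    intro cs q delta h
    match cs with
    | [] => rfl
    | c :: rest =>
      rw [pvALoop_cons, pvSkipString_cons]
      by_cases hb : c = '\\'
      · simp only [hb, if_true]
        cases rest with
        | nil => rfl
        | cons x rest2 =>
          simp only []
          exact ih rest2 q delta (by simp at h; omega)
      · simp only [hb, if_false]
        by_cases hq : c = q
        · have hsome : some q = some c := by rw [hq]
          simp [hsome, hq]
        · have hsome : ¬ (some q = some c) := by
            simp only [Option.some.injEq]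
            exact fun e => hq e.symm
          simp only [hsome, hq, if_false, if_true]
          exact ih rest q delta (by simp at h; omega)

theorem pvALoop_str (cs : List Char) (q : Char) (delta : Int) :
    pvALoop cs delta true (some q) = pvALoop (pvSkipString cs q) delta false (some q) :=
  pvALoop_str_aux cs.length cs q delta le_rfl

theorem pvMain (fuel : Nat) : ∀ (cs : List Char) (delta : Int) (sc : Option Char),
    cs.length ≤ fuel →
    pvALoop cs delta false sc
      = delta + ((pvCleanLoop fuel cs []).count '{' : Int) - ((pvCleanLoop fuel cs []).count '}' : Int) := by
  induction fuel with
  | zero =>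
    intro cs delta sc h
    have : cs = [] := by cases cs with | nil => rfl | cons a l => simp at h
    subst this
    simp [pvALoop, pvCleanLoop]
  | succ fuel ih =>
    intro cs delta sc h
    match cs with
    | [] => simp [pvALoop, pvCleanLoop]
    | ch :: rest =>
      have hlen : rest.length ≤ fuel := by simp at h; omega
      rw [pvALoop_cons]
      conv_rhs => rw [pvCleanLoop]
      simp only [if_false, Bool.false_eq_true]
      by_cases hq : ch = '"' ∨ ch = '\''
      · simp only [hq, if_true]
        rw [pvALoop_str]
        have hs := pvSkipString_length_le rest ch
        exact ih _ delta (some ch) (by omega)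
      · simp only [hq, if_false]
        by_cases ho : ch = '{'
        · simp only [ho, if_true]
          have hsl : ¬ (('{' : Char) = '/' ∧ rest ≠ [] ∧ rest.headD ' ' = '/') := by simp
          rw [ih rest (delta + 1) sc hlen,
              pvCleanLoop_acc fuel rest ['{'] hlen]
          simp only [hsl, if_false, List.reverse_cons, List.reverse_nil, List.nil_append,
            List.singleton_append, List.count_cons]
          simp
          omega
        · simp only [ho, if_false]
          by_cases hc : ch = '}'
          · simp only [hc, if_true]
            have hsl : ¬ (('}' : Char) = '/' ∧ rest ≠ [] ∧ rest.headD ' ' = '/') := by simp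
            rw [ih rest (delta - 1) sc hlen,
                pvCleanLoop_acc fuel rest ['}'] hlen]
            simp only [hsl, if_false, List.reverse_cons, List.reverse_nil, List.nil_append,
              List.singleton_append, List.count_cons]
            simp
            omega
          · simp only [hc, if_false]
            by_cases hsl : ch = '/' ∧ rest ≠ [] ∧ rest.headD ' ' = '/'
            · obtain ⟨hA, hB, hC⟩ := hsl
              have hC' : rest.head?.getD ' ' = '/' := by
                cases rest with
                | nil => exact absurd rfl hB
                | cons x l => simpa using hC
              simp [hA, hB, hC']
            · simp only [hsl, if_false]
              rw [ih rest delta sc hlen,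
                  pvCleanLoop_acc fuel rest [ch] hlen]
              have h1 : (ch == '{') = false := by simpa using ho
              have h2 : (ch == '}') = false := by simpa using hc
              simp [List.count_cons, h1, h2]

-- ===== VERDICT (by name: the statement is the Claim_ definition above) =====
theorem count_braces_in_line_py_spec : Claim_equal_count_braces_in_line_py := by
  intro line _
  unfold Spec_count_braces_in_line_py count_braces_in_line_py count_braces_in_line_py_alt
  simp only [pvMain line.toList.length line.toList 0 none le_rfl]
  simp
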